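-- pv_equiv track=rewrite | github.com/b2sdev/CodeSignal-Solutions | TheCore/D-Loop-Tunnel/countBlackCells.py | solution
-- ===== SOURCE A (Python) =====
-- def solution(n, m):
--     def gcd(a, b):
--         while b:
--             a, b = b, a % b
--         return a
--
--     def line(x1, y1, x2, y2):
--         return gcd(abs(x2 - x1), abs(y2 - y1))
--
--     return n + m + line(n, m, 0, 0) - 2
-- ===== SOURCE B (Python) =====
-- def solution(n, m):
--     def gcd(a, b):
--         # Stein's binary gcd on nonnegative ints
--         if a == 0:
--             return b
--         if b == 0:
--             return a
--         if a % 2 == 0: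
--             if b % 2 == 0:
--                 return 2 * gcd(a // 2, b // 2)
--             return gcd(a // 2, b)
--         if b % 2 == 0:
--             return gcd(a, b // 2)
--         if a >= b:
--             return gcd((a - b) // 2, b)
--         return gcd(a, (b - a) // 2)
--
--     return n + m + gcd(abs(n), abs(m)) - 2
-- ===== Notes on version B (the rewrite author's own statement) =====
-- stated objective: alternative
-- what changed: Replaces the iterative modulo-based Euclid gcd inside the closed form n+m+gcd(|n|,|m|)-2 with a recursive Stein binary gcd (halving and subtraction, no division by b).
import Mathlib
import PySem

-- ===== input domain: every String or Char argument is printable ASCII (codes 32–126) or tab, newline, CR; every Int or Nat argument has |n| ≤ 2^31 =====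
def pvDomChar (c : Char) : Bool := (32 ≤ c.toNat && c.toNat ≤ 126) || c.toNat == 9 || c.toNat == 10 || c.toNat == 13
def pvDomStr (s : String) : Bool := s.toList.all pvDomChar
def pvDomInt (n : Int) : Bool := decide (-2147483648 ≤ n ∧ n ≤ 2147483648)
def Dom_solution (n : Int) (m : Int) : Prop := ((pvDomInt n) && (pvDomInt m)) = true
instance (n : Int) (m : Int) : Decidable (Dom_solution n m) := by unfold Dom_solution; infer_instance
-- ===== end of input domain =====

-- B replaces A's iterative modulo-based Euclid gcd with a recursive Stein binary gcd
-- (halving/subtraction) inside the same closed form n + m + gcd(|n|,|m|) - 2; objective: alternative.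

-- ===== PORT A =====
-- termination fact for the while-loop recursion: |a % b| < |b| for b ≠ 0 (Python % has the divisor's sign)
theorem pvModNatAbsLt (a b : Int) (h : b ≠ 0) : (PySem.Int.mod a b).natAbs < b.natAbs := by
  rcases lt_trichotomy b 0 with hb | hb | hb
  · have := PySem.Int.mod_neg_bounds (a := a) hb; omega
  · omega
  · have h1 := PySem.Int.mod_nonneg (a := a) hb
    have h2 := PySem.Int.mod_lt (a := a) hb
    omega

-- A's inner `gcd`: `while b: a, b = b, a % b; return a`
def pvGcdLoop (a b : Int) : Int :=
  if h : b = 0 then a else pvGcdLoop b (PySem.Int.mod a b)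
termination_by b.natAbs
decreasing_by exact pvModNatAbsLt a b h

-- A's inner `line`
def pvLine (x1 y1 x2 y2 : Int) : Int := pvGcdLoop |x2 - x1| |y2 - y1|

def solution (n : Int) (m : Int) : Int := n + m + pvLine n m 0 0 - 2

-- ===== PORT B =====
-- B's recursive Stein binary gcd; it is only called on abs(n), abs(m), i.e. on nonnegative
-- Python ints, which are represented as Nat here (Nat's % and / agree with Python's on them).
def pvGcdStein (a b : Nat) : Nat :=
  if a = 0 then b
  else if b = 0 then a
  else if a % 2 = 0 then
    if b % 2 = 0 then 2 * pvGcdStein (a / 2) (b / 2)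
    else pvGcdStein (a / 2) b
  else if b % 2 = 0 then pvGcdStein a (b / 2)
  else if b ≤ a then pvGcdStein ((a - b) / 2) b
  else pvGcdStein a ((b - a) / 2)
termination_by a + b
decreasing_by all_goals omega

def solution_alt (n : Int) (m : Int) : Int := n + m + (pvGcdStein n.natAbs m.natAbs : Int) - 2

-- ===== PRECONDITION & SPEC =====
def Spec_solution (n : Int) (m : Int) (out : Int) : Prop := out = solution_alt n m
instance (n : Int) (m : Int) (out : Int) : Decidable (Spec_solution n m out) := by unfold Spec_solution; infer_instance

-- ===== CLAIM (what is proved, stated in full; the proofs are below) =====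
def Claim_equal_solution : Prop := ∀ (n : Int) (m : Int), Dom_solution n m → Spec_solution n m (solution n m)

-- ===== LEMMAS AND PROOFS =====

-- A's loop computes Nat.gcd on nonnegative (cast) arguments
theorem pvGcdLoop_eq (k : Nat) : ∀ (m : Nat), pvGcdLoop (m : Int) (k : Int) = (Nat.gcd m k : Int) := by
  induction k using Nat.strong_induction_on with
  | _ k ih =>
    intro m
    rw [pvGcdLoop]
    by_cases hk : k = 0
    · subst hk; simp
    · have hk' : ((k : Int) ≠ 0) := by exact_mod_cast hk
      rw [dif_neg hk', PySem.Int.mod_natCast]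
      rw [ih (m % k) (Nat.mod_lt _ (Nat.pos_of_ne_zero hk)) k]
      rw [Nat.gcd_comm k (m % k), ← Nat.gcd_rec k m, Nat.gcd_comm k m]

-- B's Stein recursion computes Nat.gcd
theorem pvGcdStein_eq (a b : Nat) : pvGcdStein a b = Nat.gcd a b := by
  fun_induction pvGcdStein a b with
  | case1 b => simp
  | case2 a ha => simp
  | case3 a b ha hb hae hbe ih =>
    have h2a : 2 * (a / 2) = a := by omega
    have h2b : 2 * (b / 2) = b := by omega
    rw [ih, ← Nat.gcd_mul_left 2 (a / 2) (b / 2), h2a, h2b]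
  | case4 a b ha hb hae hbo ih =>
    have h2a : 2 * (a / 2) = a := by omega
    have hcop : Nat.Coprime 2 b := by simp [Nat.coprime_two_left, Nat.odd_iff]; omega
    rw [ih, ← Nat.Coprime.gcd_mul_left_cancel (a / 2) hcop, h2a]
  | case5 a b ha hb hao hbe ih =>
    have h2b : 2 * (b / 2) = b := by omega
    have hcop : Nat.Coprime 2 a := by simp [Nat.coprime_two_left, Nat.odd_iff]; omega
    rw [ih, Nat.gcd_comm, ← Nat.Coprime.gcd_mul_left_cancel (b / 2) hcop, h2b, Nat.gcd_comm]
  | case6 a b ha hb hao hbo hba ih =>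
    have hcop : Nat.Coprime 2 b := by simp [Nat.coprime_two_left, Nat.odd_iff]; omega
    have h2 : 2 * ((a - b) / 2) = a - b := by omega
    rw [ih, ← Nat.Coprime.gcd_mul_left_cancel ((a - b) / 2) hcop, h2,
      Nat.gcd_sub_self_left (by omega)]
  | case7 a b ha hb hao hbo hba ih =>
    have hcop : Nat.Coprime 2 a := by simp [Nat.coprime_two_left, Nat.odd_iff]; omega
    have h2 : 2 * ((b - a) / 2) = b - a := by omega
    rw [ih, Nat.gcd_comm, ← Nat.Coprime.gcd_mul_left_cancel ((b - a) / 2) hcop, h2,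
      Nat.gcd_sub_self_left (by omega), Nat.gcd_comm]

-- ===== VERDICT (by name: the statement is the Claim_ definition above) =====
theorem solution_spec : Claim_equal_solution := by
  intro n m _
  unfold Spec_solution solution solution_alt pvLine
  have h1 : |0 - n| = ((n.natAbs : Nat) : Int) := by
    rw [zero_sub, abs_neg, Int.abs_eq_natAbs]
  have h2 : |0 - m| = ((m.natAbs : Nat) : Int) := by
    rw [zero_sub, abs_neg, Int.abs_eq_natAbs]
  rw [h1, h2, pvGcdLoop_eq m.natAbs n.natAbs, pvGcdStein_eq]
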